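-- pv_equiv track=rewrite | github.com/moti9/iCode | cp/D_Turtle_Tenacity_Continual_Mods.py | possible_rearrangement
-- ===== SOURCE A (Python) =====
-- import itertools
--
-- def possible_rearrangement(arr):
--     for permutation in itertools.permutations(arr):
--         result = permutation[0]
--         for num in permutation[1:]:
--             result %= num
--             if result == 0:
--                 break
--         else:
--             return "YES"
--     return "NO"
-- ===== SOURCE B (Python) =====
-- def possible_rearrangement(arr):
--     # Backtracking DFS over "pick one remaining element" choices with pruning:
--     # a prefix whose chained mod hits 0 is abandoned once, instead of being
--     # re-walked inside every permutation that shares it.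
--     def picks(l):
--         # all ways to pick one element: [(element, rest)] in index order
--         if not l:
--             return []
--         x, t = l[0], l[1:]
--         return [(x, t)] + [(y, [x] + rest) for (y, rest) in picks(t)]
--
--     def solve(r, rem):
--         if not rem:
--             return True
--         for x, rest in picks(rem):
--             s = r % x
--             if s != 0 and solve(s, rest):
--                 return True
--         return False
--
--     return "YES" if any(solve(x, rest) for x, rest in picks(arr)) else "NO"
-- ===== Notes on version B (the rewrite author's own statement) =====
-- stated objective: alternative
-- what changed: A materializes every one of the n! permutations and re-walks shared prefixes; B is a recursive backtracking DFS over pick-one-element choices that abandons a prefix the moment its chained mod hits 0, so failing prefixes are explored once.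
import Mathlib
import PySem

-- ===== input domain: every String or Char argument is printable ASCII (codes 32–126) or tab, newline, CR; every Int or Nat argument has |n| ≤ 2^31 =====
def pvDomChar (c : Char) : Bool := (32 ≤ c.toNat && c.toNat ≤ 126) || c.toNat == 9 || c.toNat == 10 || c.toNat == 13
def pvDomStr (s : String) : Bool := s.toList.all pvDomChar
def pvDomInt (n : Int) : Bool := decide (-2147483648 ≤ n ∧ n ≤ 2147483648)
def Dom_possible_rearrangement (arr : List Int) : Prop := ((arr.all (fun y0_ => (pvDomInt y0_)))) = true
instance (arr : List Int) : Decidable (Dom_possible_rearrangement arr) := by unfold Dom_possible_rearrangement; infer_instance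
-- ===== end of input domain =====

-- B replaces A's full enumeration of all n! permutations by a pruned backtracking
-- DFS over "pick one remaining element" choices (objective: alternative/faster search).

-- ===== PORT A =====
-- inner for-loop of A: true ⟺ the loop runs to completion ("for … else") with no result hitting 0
def pvChain (r : Int) (l : List Int) : Bool :=
  match l with
  | [] => true
  | n :: t =>
    let r' := PySem.Int.mod r n
    if r' == 0 then false else pvChain r' t

-- body of A's outer loop on one permutation: permutation[0] then the inner loop
-- (the p = [] arm is Python's IndexError on permutation[0], reachable only for arr = [], outside Pre_)
def pvRun (p : List Int) : Bool :=
  match p with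
  | [] => false
  | h :: t => pvChain h t

-- outer for-loop of A with its early "return YES"
def pvLoopA (ps : List (List Int)) : String :=
  match ps with
  | [] => "NO"
  | p :: rest => if pvRun p then "YES" else pvLoopA rest

def possible_rearrangement (arr : List Int) : String :=
  pvLoopA (PySem.List.permutations arr arr.length)

-- ===== PORT B =====
-- all ways to pick one element of l: (element, rest) in index order
def pvPicks (l : List Int) : List (Int × List Int) :=
  match l with
  | [] => []
  | x :: t => (x, t) :: (pvPicks t).map (fun p => (p.1, x :: p.2))

-- B's recursive solve; fuel = rem.length makes the recursion structural (the 0-fuel arm is unreachable)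
def pvSolve (fuel : Nat) (r : Int) (rem : List Int) : Bool :=
  match rem, fuel with
  | [], _ => true
  | _, 0 => false
  | rem, f + 1 =>
    (pvPicks rem).any (fun p =>
      let s := PySem.Int.mod r p.1
      !(s == 0) && pvSolve f s p.2)

def possible_rearrangement_alt (arr : List Int) : String :=
  if (pvPicks arr).any (fun p => pvSolve p.2.length p.1 p.2) then "YES" else "NO"

-- ===== PRECONDITION & SPEC =====
-- Pre_ excludes exactly the inputs where Python A raises: the empty list (IndexError on
-- permutation[0]) and any list of length ≥ 2 containing 0 (ZeroDivisionError: some permutation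
-- reaches '% 0' with a nonzero result before any permutation can return "YES").
def Pre_possible_rearrangement (arr : List Int) : Prop :=
  arr ≠ [] ∧ (arr.length = 1 ∨ (0 : Int) ∉ arr)
instance (arr : List Int) : Decidable (Pre_possible_rearrangement arr) := by
  unfold Pre_possible_rearrangement; infer_instance
def pvWitness_possible_rearrangement : List Int := [3, 2]

def Spec_possible_rearrangement (arr : List Int) (out : String) : Prop := out = possible_rearrangement_alt arr
instance (arr : List Int) (out : String) : Decidable (Spec_possible_rearrangement arr out) := by unfold Spec_possible_rearrangement; infer_instance

-- ===== CLAIM (what is proved, stated in full; the proofs are below) =====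
def Claim_equal_possible_rearrangement : Prop := ∀ (arr : List Int), Dom_possible_rearrangement arr → Pre_possible_rearrangement arr → Spec_possible_rearrangement arr (possible_rearrangement arr)

-- ===== LEMMAS AND PROOFS =====

-- PySem.List.permutations unfolding equation
lemma pvPerms_succ (xs : List Int) (r : Nat) :
    PySem.List.permutations xs (r + 1) =
      (List.range xs.length).flatMap (fun i =>
        match xs[i]? with
        | none => []
        | some y => (PySem.List.permutations (xs.eraseIdx i) r).map (y :: ·)) := by
  rw [PySem.List.permutations]
  congr 1
  funext i
  cases xs[i]? <;> rfl

-- index-based enumeration of picks = pvPicks (no membership reasoning needed: the match absorbs out-of-range)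
lemma pvPicks_flatMap {β : Type} (t : List Int) (F : Int → List Int → List β) :
    (List.range t.length).flatMap (fun i =>
        match t[i]? with
        | none => []
        | some y => F y (t.eraseIdx i)) =
      (pvPicks t).flatMap (fun p => F p.1 p.2) := by
  induction t generalizing F with
  | nil => rfl
  | cons x s ih =>
      simp only [pvPicks, List.length_cons, List.range_succ_eq_map, List.flatMap_cons,
        List.flatMap_map, List.getElem?_cons_zero, List.eraseIdx_cons_zero,
        List.getElem?_cons_succ, List.eraseIdx_cons_succ]
      exact congrArg _ (ih (fun y r => F y (x :: r)))

lemma pvPerms_eq_picks (x : Int) (t : List Int) :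
    PySem.List.permutations (x :: t) (t.length + 1) =
      (pvPicks (x :: t)).flatMap (fun p =>
        (PySem.List.permutations p.2 t.length).map (p.1 :: ·)) := by
  rw [pvPerms_succ]
  exact pvPicks_flatMap (x :: t) (fun y rest => (PySem.List.permutations rest t.length).map (y :: ·))

lemma pvChain_cons (r y : Int) (q : List Int) :
    pvChain r (y :: q) = (!(PySem.Int.mod r y == 0) && pvChain (PySem.Int.mod r y) q) := by
  simp only [pvChain]
  by_cases h : PySem.Int.mod r y == 0 <;> simp [h]

lemma pvAny_const_and {α : Type} (l : List α) (c : Bool) (f : α → Bool) :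
    l.any (fun q => c && f q) = (c && l.any f) := by
  cases c <;> simp

-- List.any respects pointwise equality on members
lemma pvAny_congr_mem {α : Type} (l : List α) (f g : α → Bool)
    (h : ∀ a ∈ l, f a = g a) : l.any f = l.any g := by
  induction l with
  | nil => rfl
  | cons a t ih =>
      have h1 : f a = g a := h a List.mem_cons_self
      have h2 := ih (fun b hb => h b (List.mem_cons_of_mem a hb))
      simp only [List.any_cons, h1, h2]

lemma pvPicks_mem_length {l : List Int} {p : Int × List Int} (h : p ∈ pvPicks l) :
    p.2.length + 1 = l.length := by
  induction l generalizing p with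
  | nil => simp [pvPicks] at h
  | cons x t ih =>
      simp only [pvPicks, List.mem_cons, List.mem_map] at h
      rcases h with h | ⟨q, hq, rfl⟩
      · subst h; rfl
      · simpa using ih hq

-- main invariant: B's DFS from state r over rem = "some permutation of rem survives starting from r"
lemma pvSolve_eq : ∀ (n : Nat) (rem : List Int) (r : Int), rem.length ≤ n →
    pvSolve n r rem = (PySem.List.permutations rem rem.length).any (pvChain r) := by
  intro n
  induction n with
  | zero =>
      intro rem r h
      cases rem with
      | nil => rfl
      | cons x t => simp at h
  | succ n ih =>
      intro rem r h
      cases rem with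
      | nil => rfl
      | cons x t =>
          show pvSolve (n + 1) r (x :: t)
              = (PySem.List.permutations (x :: t) (t.length + 1)).any (pvChain r)
          rw [pvPerms_eq_picks, List.any_flatMap]
          simp only [pvSolve]
          apply pvAny_congr_mem
          intro p hp
          have hp2 : p.2.length = t.length := by
            have := pvPicks_mem_length hp
            simp at this
            omega
          have hle : p.2.length ≤ n := by
            have hlen : t.length ≤ n := by simpa using h
            omega
          simp only [List.any_map, Function.comp_def, pvChain_cons, pvAny_const_and]
          rw [← hp2, ih p.2 (PySem.Int.mod r p.1) hle]

lemma pvLoopA_any (ps : List (List Int)) :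
    pvLoopA ps = if ps.any pvRun then "YES" else "NO" := by
  induction ps with
  | nil => rfl
  | cons p rest ih =>
      simp only [pvLoopA, List.any_cons]
      by_cases hc : pvRun p <;> simp [hc, ih]

-- ===== VERDICT (by name: the statement is the Claim_ definition above) =====
theorem possible_rearrangement_spec : Claim_equal_possible_rearrangement := by
  intro arr _ _
  unfold Spec_possible_rearrangement possible_rearrangement possible_rearrangement_alt
  cases arr with
  | nil => rfl
  | cons x t =>
      rw [pvLoopA_any]
      show (if (PySem.List.permutations (x :: t) (t.length + 1)).any pvRun then "YES" else "NO") = _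
      rw [pvPerms_eq_picks, List.any_flatMap]
      have hB : ∀ p ∈ pvPicks (x :: t),
          ((PySem.List.permutations p.2 t.length).map (p.1 :: ·)).any pvRun
            = pvSolve p.2.length p.1 p.2 := by
        intro p hp
        have hp2 : p.2.length = t.length := by
          have := pvPicks_mem_length hp
          simp at this
          omega
        simp only [List.any_map, Function.comp_def, pvRun]
        rw [pvSolve_eq p.2.length p.2 p.1 (le_refl _), hp2]
      congr 1
      rw [pvAny_congr_mem _ _ _ hB]
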